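-- pv_equiv track=rewrite | github.com/haroldmei/MLAI | CS221_2019_Spring/intvw/longfac.py | extraLongFactorials
-- ===== SOURCE A (Python) =====
-- def extraLongFactorials(n):
--     def _add(a,b):
--         la = len(a)
--         lb = len(b)
--         # fill 0s
--         if la > lb:
--             for i in range(la - lb):
--                 b.insert(0,0)
--         elif la < lb:
--             for i in range(lb - la):
--                 a.insert(0,0)
--         result = [0]*max(la,lb)
--         c = 0
--         for i in reversed(range(lb)):
--             p1 = a[i]
--             p2 = b[i]
--             r = p1 + p2 + c
--             c = int(r / 10)
--             result[i] = int(r % 10)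
--
--         if c > 0:
--             result.insert(0,c)
--         return result
--
--     # multiply with a single digit
--     def __mul(a,b):
--         c = 0
--         la = len(a)
--         result = [0]*la
--         for i in reversed(range(la)):
--             r = a[i] * b + c
--             c = int(r / 10)
--             result[i] = int(r % 10)
--         if c > 0:
--             result.insert(0, c)
--         return result
--     def _mul(a,b):
--         lb = len(b)
--         r = [0]
--         for i in reversed(range(lb)):
--             cur = __mul(a, b[i])
--             if lb - i > 1:
--                 cur = cur + [0]*(lb - i - 1)    # insert 0s
--             r = _add(r, cur)
--         return r
--     def intToList(r):
--         op1 = []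
--         while r > 0:
--             op1.insert(0, r%10)
--             r = int(r / 10)
--         return op1
--     def listToInt(a):
--         l = len(a)
--         r = 0
--         for i in reversed(range(l)):
--             r = r + a[i] * (10**(l - i - 1))
--         return r
--     r = [1]
--     for i in range(n):
--         #op1 = intToList(r)
--         op2 = intToList(i + 1)
--         r = _mul(r, op2)
--     return listToInt(r)
-- ===== SOURCE B (Python) =====
-- def extraLongFactorials(n):
--     # Balanced divide-and-conquer product of the range [1, n]; returns 1 for n <= 0.
--     def prod(lo, hi):
--         if lo > hi:
--             return 1
--         if lo == hi:
--             return lo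
--         mid = (lo + hi) // 2
--         return prod(lo, mid) * prod(mid + 1, hi)
--     return prod(1, n)
-- ===== Notes on version B (the rewrite author's own statement) =====
-- stated objective: faster
-- what changed: Replaces A's schoolbook base-10 digit-list accumulation (repeatedly multiplying a growing digit list by each factor) with a balanced divide-and-conquer product prod(1,n) on native big integers.
import Mathlib
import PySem

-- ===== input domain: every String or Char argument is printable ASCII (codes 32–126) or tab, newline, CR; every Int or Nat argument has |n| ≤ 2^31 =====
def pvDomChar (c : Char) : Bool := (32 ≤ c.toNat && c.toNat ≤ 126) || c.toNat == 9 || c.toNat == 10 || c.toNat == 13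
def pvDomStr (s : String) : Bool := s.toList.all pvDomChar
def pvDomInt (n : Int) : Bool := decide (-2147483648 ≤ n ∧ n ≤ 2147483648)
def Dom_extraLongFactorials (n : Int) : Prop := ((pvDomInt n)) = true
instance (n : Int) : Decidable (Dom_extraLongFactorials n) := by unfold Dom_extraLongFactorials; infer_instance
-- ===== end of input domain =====

-- B replaces A's base-10 digit-list accumulation with a balanced divide-and-conquer
-- product prod(1,n) on integers (objective: faster; measured).

-- ===== PORT A =====
-- A's inner loops index a[i], b[i] with i always in range on every executed call
-- (established in the proofs below), so List.getD is exact there; Python's int(r/10)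
-- on the small nonnegative ints arising here is truncated division Int.tdiv r 10
-- (float division is exact at these magnitudes), and r % 10 is PySem.Int.mod.

-- the 'for i in reversed(range(lb))' body of _add: fuel i runs indices i-1, …, 0
def pvAddLoop (a b : List Int) : Nat → List Int → Int → List Int × Int
  | 0, result, c => (result, c)
  | i + 1, result, c =>
    let p1 := a.getD i 0
    let p2 := b.getD i 0
    let r := p1 + p2 + c
    pvAddLoop a b i (result.set i (PySem.Int.mod r 10)) (Int.tdiv r 10)

-- A's _add (repeated b.insert(0,0) = prepending a block of zeros)
def pyAddList (a b : List Int) : List Int :=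
  let la := a.length
  let lb := b.length
  let b' := if la > lb then List.replicate (la - lb) 0 ++ b else b
  let a' := if la < lb then List.replicate (lb - la) 0 ++ a else a
  let st := pvAddLoop a' b' lb (List.replicate (max la lb) 0) 0
  if st.2 > 0 then st.2 :: st.1 else st.1

-- the 'for i in reversed(range(la))' body of __mul
def pvMulLoop (a : List Int) (b : Int) : Nat → List Int → Int → List Int × Int
  | 0, result, c => (result, c)
  | i + 1, result, c =>
    let r := a.getD i 0 * b + c
    pvMulLoop a b i (result.set i (PySem.Int.mod r 10)) (Int.tdiv r 10)

-- A's __mul (multiply a digit list by a single digit)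
def pyMulDigit (a : List Int) (b : Int) : List Int :=
  let st := pvMulLoop a b a.length (List.replicate a.length 0) 0
  if st.2 > 0 then st.2 :: st.1 else st.1

-- A's _mul
def pyMulList (a b : List Int) : List Int :=
  let lb := b.length
  (List.range lb).reverse.foldl (fun r i =>
    let cur := pyMulDigit a (b.getD i 0)
    let cur := if lb - i > 1 then cur ++ List.replicate (lb - i - 1) 0 else cur
    pyAddList r cur) [0]

-- A's intToList ('while r > 0' loop; each iteration prepends r % 10)
def pyIntToList (r : Int) : List Int :=
  if h : r > 0 then pyIntToList (Int.tdiv r 10) ++ [PySem.Int.mod r 10] else []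
termination_by r.toNat
decreasing_by
  have h10 : Int.tdiv r 10 = r / 10 := Int.tdiv_eq_ediv_of_nonneg (by omega)
  rw [h10]; omega

-- A's listToInt
def pyListToInt (a : List Int) : Int :=
  let l := a.length
  (List.range l).reverse.foldl (fun r i => r + a.getD i 0 * 10 ^ (l - i - 1)) 0

def extraLongFactorials (n : Int) : Int :=
  let r := (PySem.List.pyRange 0 n 1).foldl (fun r i => pyMulList r (pyIntToList (i + 1))) [1]
  pyListToInt r

-- ===== PORT B =====
-- prod(lo, hi): product of the integers in [lo, hi], by splitting at (lo+hi)//2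
def pvProd (lo hi : Int) : Int :=
  if lo > hi then 1
  else if lo = hi then lo
  else
    let mid := PySem.Int.floordiv (lo + hi) 2
    pvProd lo mid * pvProd (mid + 1) hi
termination_by (hi - lo).toNat
decreasing_by
  · have h := PySem.Int.floordiv_two_mid_bounds (lo := lo) (hi := hi) (by omega)
    have h2 : PySem.Int.floordiv (lo + hi) 2 < hi :=
      (PySem.Int.floordiv_lt_iff_lt_mul (by omega)).2 (by omega)
    omega
  · have h := PySem.Int.floordiv_two_mid_bounds (lo := lo) (hi := hi) (by omega)
    omega

def extraLongFactorials_alt (n : Int) : Int := pvProd 1 n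

-- ===== PRECONDITION & SPEC =====
def Spec_extraLongFactorials (n : Int) (out : Int) : Prop := out = extraLongFactorials_alt n
instance (n : Int) (out : Int) : Decidable (Spec_extraLongFactorials n out) := by unfold Spec_extraLongFactorials; infer_instance

-- ===== CLAIM (what is proved, stated in full; the proofs are below) =====
def Claim_equal_extraLongFactorials : Prop := ∀ (n : Int), Dom_extraLongFactorials n → Spec_extraLongFactorials n (extraLongFactorials n)

-- ===== LEMMAS AND PROOFS =====

-- value of a big-endian digit list
def pvVal : List Int → Int
  | [] => 0
  | d :: t => d * 10 ^ t.length + pvVal t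

-- all entries are base-10 digits
def pvDigits (a : List Int) : Prop := ∀ d ∈ a, 0 ≤ d ∧ d < 10

lemma pvVal_append_single (x : List Int) (d : Int) :
    pvVal (x ++ [d]) = pvVal x * 10 + d := by
  induction x with
  | nil => simp [pvVal]
  | cons h t ih => simp [pvVal, ih, pow_succ]; ring

lemma pvVal_zeros (k : Nat) : pvVal (List.replicate k 0) = 0 := by
  induction k with
  | zero => rfl
  | succ k ih => simp [List.replicate_succ, pvVal, ih]

lemma pvVal_append_zeros (x : List Int) (k : Nat) :
    pvVal (x ++ List.replicate k 0) = pvVal x * 10 ^ k := by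
  induction x with
  | nil => simp [pvVal, pvVal_zeros]
  | cons h t ih => simp [pvVal, ih, pow_add]; ring

lemma pvVal_zeros_append (k : Nat) (x : List Int) :
    pvVal (List.replicate k 0 ++ x) = pvVal x := by
  induction k with
  | zero => rfl
  | succ k ih => simpa [List.replicate_succ, pvVal] using ih

lemma pvVal_nonneg_lt {a : List Int} (h : pvDigits a) :
    0 ≤ pvVal a ∧ pvVal a < 10 ^ a.length := by
  induction a with
  | nil => simp [pvVal]
  | cons d t ih =>
    have hd := h d (by simp)
    have ht := ih (fun x hx => h x (by simp [hx]))
    have hp : (0:Int) < 10 ^ t.length := by positivity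
    simp only [pvVal, List.length_cons, pow_succ]
    constructor
    · nlinarith
    · nlinarith

lemma pvDigits_getD {a : List Int} (h : pvDigits a) (j : Nat) :
    0 ≤ a.getD j 0 ∧ a.getD j 0 < 10 := by
  by_cases hj : j < a.length
  · rw [List.getD_eq_getElem a 0 hj]
    exact h _ (List.getElem_mem hj)
  · rw [List.getD_eq_default a 0 (by omega)]
    omega

lemma pvDigits_zeros_append {a : List Int} (h : pvDigits a) (k : Nat) :
    pvDigits (List.replicate k 0 ++ a) := by
  intro d hd
  rcases List.mem_append.1 hd with hd | hd
  · have := List.eq_of_mem_replicate hd; omega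
  · exact h d hd

lemma pvDigits_append_zeros {a : List Int} (h : pvDigits a) (k : Nat) :
    pvDigits (a ++ List.replicate k 0) := by
  intro d hd
  rcases List.mem_append.1 hd with hd | hd
  · exact h d hd
  · have := List.eq_of_mem_replicate hd; omega

-- Python's int(r/10), r%10 for 0 ≤ r
lemma pvDecomp {r : Int} (h : 0 ≤ r) :
    10 * Int.tdiv r 10 + PySem.Int.mod r 10 = r ∧
    0 ≤ PySem.Int.mod r 10 ∧ PySem.Int.mod r 10 < 10 ∧
    Int.tdiv r 10 = r / 10 := by
  have h1 : PySem.Int.mod r 10 = r % 10 := PySem.Int.mod_eq_emod_of_pos (by omega)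
  have h2 : Int.tdiv r 10 = r / 10 := Int.tdiv_eq_ediv_of_nonneg h
  rw [h1, h2]
  omega

lemma pvAddLoop_spec (a b : List Int) :
    ∀ (i : Nat) (result : List Int) (c : Int),
    i ≤ a.length → i ≤ b.length → i ≤ result.length →
    (∀ j, j < i → 0 ≤ a.getD j 0 ∧ a.getD j 0 < 10) →
    (∀ j, j < i → 0 ≤ b.getD j 0 ∧ b.getD j 0 < 10) →
    0 ≤ c → c < 10 →
    (pvAddLoop a b i result c).1.length = result.length ∧
    (pvAddLoop a b i result c).1.drop i = result.drop i ∧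
    pvDigits ((pvAddLoop a b i result c).1.take i) ∧
    0 ≤ (pvAddLoop a b i result c).2 ∧ (pvAddLoop a b i result c).2 < 10 ∧
    pvVal ((pvAddLoop a b i result c).1.take i) + (pvAddLoop a b i result c).2 * 10 ^ i
      = pvVal (a.take i) + pvVal (b.take i) + c := by
  intro i
  induction i with
  | zero =>
    intro result c _ _ _ _ _ hc0 hc1
    refine ⟨rfl, rfl, by intro x hx; simp at hx, hc0, hc1, by simp [pvAddLoop, pvVal]⟩
  | succ i ih =>
    intro result c ha hb hres hda hdb hc0 hc1
    have hai := hda i (by omega)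
    have hbi := hdb i (by omega)
    set r : Int := a.getD i 0 + b.getD i 0 + c with hr
    have hrpos : 0 ≤ r := by omega
    obtain ⟨hdec, hm0, hm1, htd⟩ := pvDecomp hrpos
    set d : Int := PySem.Int.mod r 10 with hd
    set c1 : Int := Int.tdiv r 10 with hc1d
    have hc1b : 0 ≤ c1 ∧ c1 < 10 := by omega
    have hstep : pvAddLoop a b (i+1) result c = pvAddLoop a b i (result.set i d) c1 := rfl
    obtain ⟨ihl, ihd, ihdig, ihc0, ihc1, ihv⟩ :=
      ih (result.set i d) c1 (by omega) (by omega) (by simp; omega)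
        (fun j hj => hda j (by omega)) (fun j hj => hdb j (by omega)) hc1b.1 hc1b.2
    rw [hstep]
    set res := (pvAddLoop a b i (result.set i d) c1).1 with hresdef
    set cout := (pvAddLoop a b i (result.set i d) c1).2 with hcoutdef
    have hlen : res.length = result.length := by simpa using ihl
    have hgi : res[i]? = some d := by
      have h1 : (res.drop i)[0]? = ((result.set i d).drop i)[0]? := by rw [ihd]
      rw [List.getElem?_drop, List.getElem?_drop] at h1
      simpa [List.getElem?_set, show i < result.length by omega] using h1
    have htake : res.take (i+1) = res.take i ++ [d] := by
      rw [List.take_add_one, hgi]; rfl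
    have hdropi1 : res.drop (i+1) = result.drop (i+1) := by
      have : (res.drop i).drop 1 = ((result.set i d).drop i).drop 1 := by rw [ihd]
      rw [List.drop_drop, List.drop_drop] at this
      rw [this, List.drop_set_of_lt (by omega)]
    have hatake : a.take (i+1) = a.take i ++ [a.getD i 0] := by
      rw [List.take_add_one, List.getElem?_eq_getElem (by omega : i < a.length)]
      rw [List.getD_eq_getElem a 0 (by omega)]; rfl
    have hbtake : b.take (i+1) = b.take i ++ [b.getD i 0] := by
      rw [List.take_add_one, List.getElem?_eq_getElem (by omega : i < b.length)]
      rw [List.getD_eq_getElem b 0 (by omega)]; rfl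
    refine ⟨hlen, hdropi1, ?_, ihc0, ihc1, ?_⟩
    · intro x hx
      rw [htake] at hx
      rcases List.mem_append.1 hx with hx | hx
      · exact ihdig x hx
      · simp at hx; omega
    · rw [htake, hatake, hbtake, pvVal_append_single, pvVal_append_single,
        pvVal_append_single, pow_succ]
      nlinarith [ihv]

lemma pvAddCore (a' b : List Int) (ha : a'.length = b.length)
    (da : pvDigits a') (db : pvDigits b) :
    pvVal ((if (pvAddLoop a' b b.length (List.replicate b.length 0) 0).2 > 0 then
        (pvAddLoop a' b b.length (List.replicate b.length 0) 0).2 ::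
          (pvAddLoop a' b b.length (List.replicate b.length 0) 0).1
      else (pvAddLoop a' b b.length (List.replicate b.length 0) 0).1))
      = pvVal a' + pvVal b ∧
    pvDigits ((if (pvAddLoop a' b b.length (List.replicate b.length 0) 0).2 > 0 then
        (pvAddLoop a' b b.length (List.replicate b.length 0) 0).2 ::
          (pvAddLoop a' b b.length (List.replicate b.length 0) 0).1
      else (pvAddLoop a' b b.length (List.replicate b.length 0) 0).1)) ∧
    ((if (pvAddLoop a' b b.length (List.replicate b.length 0) 0).2 > 0 then
        (pvAddLoop a' b b.length (List.replicate b.length 0) 0).2 ::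
          (pvAddLoop a' b b.length (List.replicate b.length 0) 0).1
      else (pvAddLoop a' b b.length (List.replicate b.length 0) 0).1)).length
      = b.length + (if 10 ^ b.length ≤ pvVal a' + pvVal b then 1 else 0) := by
  set lb := b.length with hlb
  obtain ⟨hl, hdrop, hdig, hc0, hc1, hv⟩ :=
    pvAddLoop_spec a' b lb (List.replicate lb 0) 0 (by omega) (by omega) (by simp)
      (fun j hj => pvDigits_getD da j) (fun j hj => pvDigits_getD db j) le_rfl (by omega)
  set st := pvAddLoop a' b lb (List.replicate lb 0) 0 with hst
  have hstl : st.1.length = lb := by simpa using hl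
  have htk : st.1.take lb = st.1 := by
    rw [← hstl]; exact List.take_length
  have hatk : a'.take lb = a' := by rw [← ha]; exact List.take_length
  have hbtk : b.take lb = b := by exact List.take_length
  rw [htk] at hv hdig
  rw [hatk, hbtk] at hv
  have hvres := pvVal_nonneg_lt hdig
  rw [hstl] at hvres
  have hva := pvVal_nonneg_lt da
  have hvb := pvVal_nonneg_lt db
  rw [ha] at hva
  have hpow : (0:Int) < 10 ^ lb := by positivity
  have hcle : st.2 ≤ 1 := by nlinarith
  by_cases hc : st.2 > 0
  · have hc1' : st.2 = 1 := by omega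
    rw [if_pos hc]
    have hcond : 10 ^ lb ≤ pvVal a' + pvVal b := by nlinarith
    refine ⟨?_, ?_, ?_⟩
    · simp only [pvVal, hstl]; omega
    · intro x hx
      rcases List.mem_cons.1 hx with hx | hx
      · omega
      · exact hdig x hx
    · simp [hstl, if_pos hcond]
  · have hc0' : st.2 = 0 := by omega
    rw [if_neg hc]
    have hcond : ¬ 10 ^ lb ≤ pvVal a' + pvVal b := by nlinarith
    exact ⟨by nlinarith, hdig, by simp [hstl, if_neg hcond]⟩

lemma pyAddList_spec {a b : List Int} (da : pvDigits a) (db : pvDigits b)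
    (hle : a.length ≤ b.length) :
    pvVal (pyAddList a b) = pvVal a + pvVal b ∧ pvDigits (pyAddList a b) ∧
    (pyAddList a b).length = b.length + (if 10 ^ b.length ≤ pvVal a + pvVal b then 1 else 0) := by
  simp only [pyAddList]
  rw [if_neg (show ¬ a.length > b.length by omega)]
  have hmax : max a.length b.length = b.length := by omega
  rw [hmax]
  by_cases hlt : a.length < b.length
  · rw [if_pos hlt]
    have ha' : (List.replicate (b.length - a.length) 0 ++ a).length = b.length := by
      simp; omega
    have hv' : pvVal (List.replicate (b.length - a.length) 0 ++ a) = pvVal a :=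
      pvVal_zeros_append _ _
    obtain ⟨h1, h2, h3⟩ := pvAddCore _ b ha' (pvDigits_zeros_append da _) db
    rw [hv'] at h1 h3
    exact ⟨h1, h2, h3⟩
  · rw [if_neg hlt]
    exact pvAddCore a b (by omega) da db

lemma pvMulLoop_spec (a : List Int) (b : Int) (hb0 : 0 ≤ b) (hb1 : b < 10) :
    ∀ (i : Nat) (result : List Int) (c : Int),
    i ≤ a.length → i ≤ result.length →
    (∀ j, j < i → 0 ≤ a.getD j 0 ∧ a.getD j 0 < 10) →
    0 ≤ c → c ≤ 9 →
    (pvMulLoop a b i result c).1.length = result.length ∧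
    (pvMulLoop a b i result c).1.drop i = result.drop i ∧
    pvDigits ((pvMulLoop a b i result c).1.take i) ∧
    0 ≤ (pvMulLoop a b i result c).2 ∧ (pvMulLoop a b i result c).2 ≤ 9 ∧
    pvVal ((pvMulLoop a b i result c).1.take i) + (pvMulLoop a b i result c).2 * 10 ^ i
      = pvVal (a.take i) * b + c := by
  intro i
  induction i with
  | zero =>
    intro result c _ _ _ hc0 hc1
    refine ⟨rfl, rfl, by intro x hx; simp at hx, hc0, hc1, by simp [pvMulLoop, pvVal]⟩
  | succ i ih =>
    intro result c ha hres hda hc0 hc1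
    have hai := hda i (by omega)
    set r : Int := a.getD i 0 * b + c with hr
    have hrpos : 0 ≤ r := by nlinarith
    have hrub : r ≤ 90 := by nlinarith
    obtain ⟨hdec, hm0, hm1, htd⟩ := pvDecomp hrpos
    set d : Int := PySem.Int.mod r 10 with hd
    set c1 : Int := Int.tdiv r 10 with hc1d
    have hc1b : 0 ≤ c1 ∧ c1 ≤ 9 := by omega
    have hstep : pvMulLoop a b (i+1) result c = pvMulLoop a b i (result.set i d) c1 := rfl
    obtain ⟨ihl, ihd, ihdig, ihc0, ihc1, ihv⟩ :=
      ih (result.set i d) c1 (by omega) (by simp; omega)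
        (fun j hj => hda j (by omega)) hc1b.1 hc1b.2
    rw [hstep]
    set res := (pvMulLoop a b i (result.set i d) c1).1 with hresdef
    have hlen : res.length = result.length := by simpa using ihl
    have hgi : res[i]? = some d := by
      have h1 : (res.drop i)[0]? = ((result.set i d).drop i)[0]? := by rw [ihd]
      rw [List.getElem?_drop, List.getElem?_drop] at h1
      simpa [List.getElem?_set, show i < result.length by omega] using h1
    have htake : res.take (i+1) = res.take i ++ [d] := by
      rw [List.take_add_one, hgi]; rfl
    have hdropi1 : res.drop (i+1) = result.drop (i+1) := by
      have : (res.drop i).drop 1 = ((result.set i d).drop i).drop 1 := by rw [ihd]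
      rw [List.drop_drop, List.drop_drop] at this
      rw [this, List.drop_set_of_lt (by omega)]
    have hatake : a.take (i+1) = a.take i ++ [a.getD i 0] := by
      rw [List.take_add_one, List.getElem?_eq_getElem (by omega : i < a.length)]
      rw [List.getD_eq_getElem a 0 (by omega)]; rfl
    refine ⟨hlen, hdropi1, ?_, ihc0, ihc1, ?_⟩
    · intro x hx
      rw [htake] at hx
      rcases List.mem_append.1 hx with hx | hx
      · exact ihdig x hx
      · simp at hx; omega
    · rw [htake, hatake, pvVal_append_single, pvVal_append_single, pow_succ]
      nlinarith [ihv]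

lemma pyMulDigit_spec {a : List Int} (da : pvDigits a) {b : Int}
    (hb0 : 0 ≤ b) (hb1 : b < 10) :
    pvVal (pyMulDigit a b) = pvVal a * b ∧ pvDigits (pyMulDigit a b) ∧
    (pyMulDigit a b).length = a.length + (if 10 ^ a.length ≤ pvVal a * b then 1 else 0) := by
  simp only [pyMulDigit]
  set la := a.length with hla
  obtain ⟨hl, hdrop, hdig, hc0, hc1, hv⟩ :=
    pvMulLoop_spec a b hb0 (by omega) la (List.replicate la 0) 0 le_rfl (by simp)
      (fun j hj => pvDigits_getD da j) le_rfl (by omega)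
  set st := pvMulLoop a b la (List.replicate la 0) 0 with hst
  have hstl : st.1.length = la := by simpa using hl
  have htk : st.1.take la = st.1 := by rw [← hstl]; exact List.take_length
  have hatk : a.take la = a := List.take_length
  rw [htk] at hv hdig
  rw [hatk] at hv
  have hvres := pvVal_nonneg_lt hdig
  rw [hstl] at hvres
  have hva := pvVal_nonneg_lt da
  have hpow : (0:Int) < 10 ^ la := by positivity
  by_cases hc : st.2 > 0
  · rw [if_pos hc]
    have hcond : 10 ^ la ≤ pvVal a * b := by nlinarith
    refine ⟨?_, ?_, ?_⟩
    · simp only [pvVal, hstl]; omega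
    · intro x hx
      rcases List.mem_cons.1 hx with hx | hx
      · omega
      · exact hdig x hx
    · simp [hstl, if_pos hcond]
  · have hc0' : st.2 = 0 := by omega
    rw [if_neg hc]
    have hcond : ¬ 10 ^ la ≤ pvVal a * b := by nlinarith
    exact ⟨by nlinarith, hdig, by simp [hstl, if_neg hcond]⟩

lemma pyMulFold (a b : List Int) (da : pvDigits a) (db : pvDigits b) (ha : 1 ≤ a.length) :
    ∀ (i : Nat) (r : List Int), i ≤ b.length → pvDigits r → 1 ≤ r.length →
    r.length ≤ a.length + (b.length - i) → pvVal r = pvVal a * pvVal (b.drop i) →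
    pvVal ((List.range i).reverse.foldl (fun r i =>
        let cur := pyMulDigit a (b.getD i 0)
        let cur := if b.length - i > 1 then cur ++ List.replicate (b.length - i - 1) 0 else cur
        pyAddList r cur) r) = pvVal a * pvVal b ∧
    pvDigits ((List.range i).reverse.foldl (fun r i =>
        let cur := pyMulDigit a (b.getD i 0)
        let cur := if b.length - i > 1 then cur ++ List.replicate (b.length - i - 1) 0 else cur
        pyAddList r cur) r) ∧
    1 ≤ ((List.range i).reverse.foldl (fun r i =>
        let cur := pyMulDigit a (b.getD i 0)
        let cur := if b.length - i > 1 then cur ++ List.replicate (b.length - i - 1) 0 else cur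
        pyAddList r cur) r).length := by
  intro i
  induction i with
  | zero =>
    intro r _ hdr hlr _ hvr
    simpa using ⟨by simpa using hvr, hdr, hlr⟩
  | succ i ih =>
    intro r hi hdr hlr hlub hvr
    rw [List.range_succ, List.reverse_append, List.reverse_singleton]
    simp only [List.singleton_append, List.foldl_cons]
    have hbi := pvDigits_getD db i
    obtain ⟨hmv, hmd, hml⟩ := pyMulDigit_spec da hbi.1 hbi.2
    set cur0 := pyMulDigit a (b.getD i 0) with hcur0
    set cur := if b.length - i > 1 then cur0 ++ List.replicate (b.length - i - 1) 0 else cur0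
      with hcur
    have hcurv : pvVal cur = pvVal cur0 * 10 ^ (b.length - i - 1) := by
      rw [hcur]
      by_cases hgt : b.length - i > 1
      · rw [if_pos hgt, pvVal_append_zeros]
      · rw [if_neg hgt, show b.length - i - 1 = 0 by omega, pow_zero, mul_one]
    have hcurl : cur.length = cur0.length + (b.length - i - 1) := by
      rw [hcur]
      by_cases hgt : b.length - i > 1
      · rw [if_pos hgt]; simp
      · rw [if_neg hgt]; omega
    have hcurd : pvDigits cur := by
      rw [hcur]
      by_cases hgt : b.length - i > 1
      · rw [if_pos hgt]; exact pvDigits_append_zeros hmd _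
      · rw [if_neg hgt]; exact hmd
    have hc0l : cur0.length = a.length ∨ cur0.length = a.length + 1 := by
      rw [hml]; split <;> omega
    have hrlecur : r.length ≤ cur.length := by omega
    obtain ⟨hav, had, hal⟩ := pyAddList_spec hdr hcurd hrlecur
    set r' := pyAddList r cur with hr'
    have hbdrop : b.drop i = b.getD i 0 :: b.drop (i+1) := by
      rw [List.getD_eq_getElem b 0 (by omega)]
      exact List.drop_eq_getElem_cons (by omega)
    have hdroplen : (b.drop (i+1)).length = b.length - i - 1 := by simp; omega
    have hvr' : pvVal r' = pvVal a * pvVal (b.drop i) := by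
      rw [hav, hvr, hcurv, hmv, hbdrop]
      simp only [pvVal, hdroplen]
      ring
    have hdd : pvDigits (b.drop i) := fun x hx => db x (List.mem_of_mem_drop hx)
    have hvltd := pvVal_nonneg_lt hdd
    have hvla := pvVal_nonneg_lt da
    have hdlen : (b.drop i).length = b.length - i := by simp
    have hsum : pvVal r + pvVal cur = pvVal a * pvVal (b.drop i) := by
      rw [← hav, hvr']
    have hlr' : r'.length ≤ a.length + (b.length - i) := by
      rcases hc0l with hc | hc
      · rw [hal]; split <;> omega
      · have hcl : cur.length = a.length + (b.length - i) := by omega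
        have hbig : pvVal a * pvVal (b.drop i) < 10 ^ (a.length + (b.length - i)) := by
          rw [pow_add]
          have h2 := hvltd.2
          rw [hdlen] at h2
          nlinarith [hvla.1, hvla.2, hvltd.1]
        have hfalse : ¬ 10 ^ cur.length ≤ pvVal r + pvVal cur := by
          rw [hcl, hsum]; omega
        rw [hal, if_neg hfalse]; omega
    have hlr'1 : 1 ≤ r'.length := by
      rw [hal]; split <;> omega
    exact ih r' (by omega) had hlr'1 (by omega) hvr'

lemma pyMulList_spec {a b : List Int} (da : pvDigits a) (db : pvDigits b)
    (ha : 1 ≤ a.length) :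
    pvVal (pyMulList a b) = pvVal a * pvVal b ∧ pvDigits (pyMulList a b) ∧
    1 ≤ (pyMulList a b).length := by
  simp only [pyMulList]
  exact pyMulFold a b da db ha b.length [0] le_rfl
    (by intro x hx; simp at hx; omega) (by simp)
    (by simpa using ha) (by simp [pvVal])

lemma pyIntToList_spec : ∀ k : Int,
    pvDigits (pyIntToList k) ∧ (0 ≤ k → pvVal (pyIntToList k) = k) := by
  intro k
  induction k using pyIntToList.induct with
  | case1 r hr ih =>
    rw [pyIntToList, dif_pos hr]
    obtain ⟨hdec, hm0, hm1, htd⟩ := pvDecomp (by omega : (0:Int) ≤ r)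
    have htd0 : 0 ≤ Int.tdiv r 10 := by omega
    refine ⟨?_, fun _ => ?_⟩
    · intro x hx
      rcases List.mem_append.1 hx with hx | hx
      · exact ih.1 x hx
      · simp at hx; omega
    · rw [pvVal_append_single, ih.2 htd0]; omega
  | case2 r hr =>
    rw [pyIntToList, dif_neg hr]
    exact ⟨by intro x hx; simp at hx, fun h => by simp [pvVal]; omega⟩

lemma pyListToInt_aux (a : List Int) :
    ∀ (i : Nat), i ≤ a.length → ∀ (r : Int),
    (List.range i).reverse.foldl (fun r j => r + a.getD j 0 * 10 ^ (a.length - j - 1)) r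
      = r + pvVal (a.take i) * 10 ^ (a.length - i) := by
  intro i
  induction i with
  | zero => intro _ r; simp [pvVal]
  | succ i ih =>
    intro hi r
    rw [List.range_succ, List.reverse_append, List.reverse_singleton]
    simp only [List.singleton_append, List.foldl_cons]
    rw [ih (by omega)]
    have htake : a.take (i+1) = a.take i ++ [a.getD i 0] := by
      rw [List.take_add_one, List.getElem?_eq_getElem (by omega : i < a.length)]
      rw [List.getD_eq_getElem a 0 (by omega)]; rfl
    rw [htake, pvVal_append_single]
    set e := a.length - i - 1 with hedef
    rw [show a.length - (i+1) = e by omega, show a.length - i = e + 1 by omega, pow_succ]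
    ring

lemma pyListToInt_eq (a : List Int) : pyListToInt a = pvVal a := by
  simp only [pyListToInt]
  rw [pyListToInt_aux a a.length le_rfl 0]
  simp

lemma pvIoc_succ_insert (x b : Int) (h : x ≤ b) :
    Finset.Ioc x (b + 1) = insert (b + 1) (Finset.Ioc x b) := by
  ext y
  simp only [Finset.mem_Ioc, Finset.mem_insert]
  omega

lemma pvAFold : ∀ (m : Nat),
    pvDigits ((PySem.List.pyRange 0 (m : Int) 1).foldl
      (fun r i => pyMulList r (pyIntToList (i + 1))) [1]) ∧
    1 ≤ ((PySem.List.pyRange 0 (m : Int) 1).foldl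
      (fun r i => pyMulList r (pyIntToList (i + 1))) [1]).length ∧
    pvVal ((PySem.List.pyRange 0 (m : Int) 1).foldl
      (fun r i => pyMulList r (pyIntToList (i + 1))) [1])
      = ∏ i ∈ Finset.Ioc (0 : Int) (m : Int), i := by
  intro m
  induction m with
  | zero =>
    rw [PySem.List.pyRange_one_eq_nil (by omega)]
    refine ⟨by intro x hx; simp at hx; omega, by simp, ?_⟩
    simp [pvVal]
  | succ m ih =>
    have hcast : ((m + 1 : Nat) : Int) = (m : Int) + 1 := by push_cast; ring
    rw [hcast, PySem.List.pyRange_one_succ_right (by omega), List.foldl_append]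
    simp only [List.foldl_cons, List.foldl_nil]
    obtain ⟨ihd, ihl, ihv⟩ := ih
    obtain ⟨hbd, hbv⟩ := pyIntToList_spec ((m : Int) + 1)
    obtain ⟨hv, hd, hl⟩ := pyMulList_spec ihd hbd ihl
    refine ⟨hd, hl, ?_⟩
    rw [hv, ihv, hbv (by omega), pvIoc_succ_insert 0 (m : Int) (by omega)]
    rw [Finset.prod_insert (by simp [Finset.mem_Ioc])]
    ring

lemma pvProd_Ioc_consecutive {a b c : Int} (h1 : a ≤ b) (h2 : b ≤ c) :
    (∏ i ∈ Finset.Ioc a b, i) * ∏ i ∈ Finset.Ioc b c, i = ∏ i ∈ Finset.Ioc a c, i := by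
  rw [← Finset.prod_union (by simp [Finset.disjoint_left, Finset.mem_Ioc]; omega),
    Finset.Ioc_union_Ioc_eq_Ioc h1 h2]

lemma pvProd_eq : ∀ lo hi : Int, pvProd lo hi = ∏ i ∈ Finset.Ioc (lo - 1) hi, i := by
  intro lo hi
  induction lo, hi using pvProd.induct with
  | case1 lo hi h =>
    rw [pvProd, if_pos h, Finset.Ioc_eq_empty (by omega), Finset.prod_empty]
  | case2 hi h =>
    rw [pvProd, if_neg h, if_pos rfl]
    have : Finset.Ioc (hi - 1) hi = {hi} := by
      ext x; simp only [Finset.mem_Ioc, Finset.mem_singleton]; omega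
    rw [this, Finset.prod_singleton]
  | case3 lo hi h1 h2 mid ih1 ih2 =>
    rw [pvProd, if_neg h1, if_neg h2]
    simp only
    obtain ⟨hm1, hm2⟩ := PySem.Int.floordiv_two_mid_bounds (by omega : lo ≤ hi)
    rw [show PySem.Int.floordiv (lo + hi) 2 = mid from rfl] at hm1 hm2 ⊢
    rw [ih1, ih2, show mid + 1 - 1 = mid by ring]
    exact pvProd_Ioc_consecutive (by omega) (by omega)

-- ===== VERDICT (by name: the statement is the Claim_ definition above) =====
theorem extraLongFactorials_spec : Claim_equal_extraLongFactorials := by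
  intro n _
  unfold Spec_extraLongFactorials extraLongFactorials extraLongFactorials_alt
  simp only
  rw [pyListToInt_eq, pvProd_eq]
  have h10 : (1:Int) - 1 = 0 := by ring
  rw [h10]
  by_cases hn : 0 ≤ n
  · have : n = ((n.toNat : Nat) : Int) := by omega
    rw [this]
    exact (pvAFold n.toNat).2.2
  · rw [PySem.List.pyRange_one_eq_nil (by omega)]
    rw [Finset.Ioc_eq_empty (by omega), Finset.prod_empty]
    simp [pvVal]
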